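-- pv_equiv track=rewrite | github.com/ABBU2712/DSA-Busted-BIT-Manipulation | Trilogy-2.py | kthXOR
-- ===== SOURCE A (Python) =====
-- def kthXOR(M,N,K,arr):
--     if N<0 or M>N:
--         return -1
--     if K>=N-M or K<0:
--         return -1
--     for _ in range(M):   #For performing iterations
--         temp=[]
--         for i in range(len(arr)-1):
--             value=arr[i]^arr[i+1]
--             temp.append(value)
--         arr=temp[:]
--     ans=arr[K]
--     return ans
-- ===== SOURCE B (Python) =====
-- def kthXOR(M, N, K, arr):
--     # After m adjacent-XOR passes, element K is a XOR-combination of the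
--     # window arr[K:K+m+1] only.  Reduce that window once per SET BIT of m
--     # (pass composed with itself doubles the shift), instead of m full passes
--     # over the whole array.
--     if N < 0 or M > N:
--         return -1
--     if K >= N - M or K < 0:
--         return -1
--     m = M if M > 0 else 0   # range(M) performs no passes for negative M
--     w = arr[K:K + m + 1]
--     s = 1
--     while m:
--         if m & 1:
--             w = [w[i] ^ w[i + s] for i in range(len(w) - s)]
--         m >>= 1
--         s <<= 1
--     return w[0]
-- ===== Notes on version B (the rewrite author's own statement) =====
-- stated objective: alternative
-- what changed: Instead of M full adjacent-XOR passes over the whole array, B slices out the (M+1)-element window starting at K and reduces it with one shifted XOR zip per set bit of M, using pass^(2^t)(w)[i] = w[i] XOR w[i+2^t] (binary doubling).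
import Mathlib
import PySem

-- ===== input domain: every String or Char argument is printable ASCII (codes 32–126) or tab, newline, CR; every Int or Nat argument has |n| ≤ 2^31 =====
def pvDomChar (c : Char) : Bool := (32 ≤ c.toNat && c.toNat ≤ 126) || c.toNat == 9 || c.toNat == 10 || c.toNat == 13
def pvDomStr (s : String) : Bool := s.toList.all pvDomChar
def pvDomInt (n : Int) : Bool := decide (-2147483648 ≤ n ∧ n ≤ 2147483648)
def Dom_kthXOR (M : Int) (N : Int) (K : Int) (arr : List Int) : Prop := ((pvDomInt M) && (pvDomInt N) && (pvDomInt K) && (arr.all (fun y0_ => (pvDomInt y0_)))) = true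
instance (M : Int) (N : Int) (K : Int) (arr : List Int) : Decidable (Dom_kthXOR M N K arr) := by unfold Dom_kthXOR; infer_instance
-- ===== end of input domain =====

-- B replaces A's M full adjacent-XOR passes over the whole array by a binary-doubling
-- reduction of just the (M+1)-length window at K (one shifted XOR zip per set bit of M).

-- ===== PORT A =====
-- one pass: temp = [arr[i] ^ arr[i+1] for i in range(len(arr)-1)] built by append
def pvPassA (a : List Int) : List Int :=
  (PySem.List.pyRange 0 ((a.length : Int) - 1) 1).foldl
    (fun temp i =>
      temp ++ [PySem.Int.bxor (PySem.List.pyGetD a i 0) (PySem.List.pyGetD a (i + 1) 0)]) []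

def kthXOR (M : Int) (N : Int) (K : Int) (arr : List Int) : Int :=
  if N < 0 ∨ M > N then -1
  else if K ≥ N - M ∨ K < 0 then -1
  else
    -- for _ in range(M): arr = pass(arr)
    let arr' := (PySem.List.pyRange 0 M 1).foldl (fun a _ => pvPassA a) arr
    PySem.List.pyGetD arr' K 0   -- ans = arr[K]; in range under Pre_

-- ===== PORT B =====
-- w = [w[i] ^ w[i+s] for i in range(len(w) - s)]
def pvShiftB (s : Nat) (w : List Int) : List Int :=
  (PySem.List.pyRange 0 ((w.length : Int) - (s : Int)) 1).map
    (fun i => PySem.Int.bxor (PySem.List.pyGetD w i 0) (PySem.List.pyGetD w (i + (s : Int)) 0))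

-- while m: if m & 1: w = shift s; m >>= 1; s <<= 1   (m, s stay nonnegative)
def pvLoopB (m s : Nat) (w : List Int) : List Int :=
  if m = 0 then w
  else pvLoopB (m / 2) (s * 2) (if m % 2 = 1 then pvShiftB s w else w)
termination_by m
decreasing_by exact Nat.div_lt_self (Nat.pos_of_ne_zero (by assumption)) (by norm_num)

def kthXOR_alt (M : Int) (N : Int) (K : Int) (arr : List Int) : Int :=
  if N < 0 ∨ M > N then -1
  else if K ≥ N - M ∨ K < 0 then -1
  else
    let m : Nat := (if M > 0 then M else 0).toNat   -- value is nonneg in Python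
    let w := PySem.List.slice arr (some K) (some (K + (m : Int) + 1))   -- arr[K:K+m+1]
    PySem.List.pyGetD (pvLoopB m 1 w) 0 0   -- w[0]; in range under Pre_

-- ===== PRECONDITION & SPEC =====
-- Pre_ excludes exactly the inputs where A raises IndexError at arr[K]: the guards did
-- not return -1 and the array has no element K after the passes (K + max(M,0) ≥ len(arr)).
def Pre_kthXOR (M : Int) (N : Int) (K : Int) (arr : List Int) : Prop :=
  (N < 0 ∨ M > N ∨ K ≥ N - M ∨ K < 0) ∨ K + max M 0 < (arr.length : Int)
instance (M : Int) (N : Int) (K : Int) (arr : List Int) : Decidable (Pre_kthXOR M N K arr) := by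
  unfold Pre_kthXOR; infer_instance

def pvWitness_kthXOR : Int × Int × Int × List Int := (2, 5, 1, [1, 2, 3, 4, 5])

def Spec_kthXOR (M : Int) (N : Int) (K : Int) (arr : List Int) (out : Int) : Prop := out = kthXOR_alt M N K arr
instance (M : Int) (N : Int) (K : Int) (arr : List Int) (out : Int) : Decidable (Spec_kthXOR M N K arr out) := by unfold Spec_kthXOR; infer_instance

-- ===== CLAIM (what is proved, stated in full; the proofs are below) =====
def Claim_equal_kthXOR : Prop := ∀ (M : Int) (N : Int) (K : Int) (arr : List Int), Dom_kthXOR M N K arr → Pre_kthXOR M N K arr → Spec_kthXOR M N K arr (kthXOR M N K arr)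

-- ===== LEMMAS AND PROOFS =====

-- the shifted-XOR zip, in zipWith form
def pvSh (s : Nat) (w : List Int) : List Int := List.zipWith PySem.Int.bxor w (w.drop s)

theorem pvBxor_eq_xor (a b : Int) : PySem.Int.bxor a b = Int.xor a b := by
  cases a <;> cases b <;> simp [PySem.Int.bxor, Int.xor] <;> omega

theorem pvXor_cancel (a b c : Int) :
    PySem.Int.bxor (PySem.Int.bxor a b) (PySem.Int.bxor b c) = PySem.Int.bxor a c := by
  simp only [pvBxor_eq_xor]
  cases a <;> cases b <;> cases c <;>
    simp [Int.xor, ← Nat.xor_assoc, Nat.xor_xor_cancel_right]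

theorem pvSh_length (s : Nat) (w : List Int) : (pvSh s w).length = w.length - s := by
  simp [pvSh]

theorem pvSh_getElem (s : Nat) (w : List Int) (i : Nat) (h : i < (pvSh s w).length) :
    (pvSh s w)[i] = PySem.Int.bxor (w[i]'(by simp [pvSh] at h; omega))
      (w[i + s]'(by simp [pvSh] at h; omega)) := by
  simp [pvSh, Nat.add_comm]

theorem pvSh_double (s : Nat) (w : List Int) : pvSh s (pvSh s w) = pvSh (2 * s) w := by
  apply List.ext_getElem
  · simp only [pvSh_length]; omega
  · intro i h1 h2
    rw [pvSh_getElem, pvSh_getElem, pvSh_getElem, pvSh_getElem, pvXor_cancel]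
    have h3 : i + s + s = i + 2 * s := by omega
    simp [h3]

theorem pvShiftB_eq (s : Nat) (w : List Int) : pvShiftB s w = pvSh s w := by
  apply List.ext_getElem
  · simp [pvShiftB, pvSh_length, PySem.List.length_pyRange_one]
  · intro i h1 h2
    have hlen : i < w.length - s := by
      simpa [pvSh_length] using h2
    simp only [pvShiftB, List.getElem_map, PySem.List.getElem_pyRange_one]
    rw [pvSh_getElem]
    have h0 : (0 : Int) + (i : Int) = ((i : Nat) : Int) := by ring
    rw [h0]
    have h1' : ((i : Nat) : Int) + (s : Int) = (((i + s : Nat)) : Int) := by push_cast; ring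
    rw [h1']
    rw [PySem.List.pyGetD_natCast, PySem.List.pyGetD_natCast]
    rw [List.getD_eq_getElem, List.getD_eq_getElem]

theorem pvPassA_eq (a : List Int) : pvPassA a = pvSh 1 a := by
  rw [← pvShiftB_eq]
  have hf : ∀ (l : List Int) (g : Int → Int), (l.map (fun x => [g x])).flatten = l.map g := by
    intro l g; induction l with
    | nil => simp
    | cons x t ih => simp [ih]
  simp [pvPassA, pvShiftB, hf]

-- (pvSh s)^[m] in binary: pvLoopB computes it
theorem pvLoopB_eq (m s : Nat) (w : List Int) : pvLoopB m s w = (pvSh s)^[m] w := by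
  induction m using Nat.strong_induction_on generalizing s w with
  | _ m ih =>
    by_cases hm : m = 0
    · subst hm; simp [pvLoopB]
    · rw [pvLoopB]
      simp only [hm, if_false]
      rw [ih (m / 2) (Nat.div_lt_self (Nat.pos_of_ne_zero hm) (by norm_num))]
      have hsplit : (pvSh s)^[m] w = (pvSh s)^[2 * (m / 2)] ((pvSh s)^[m % 2] w) := by
        rw [← Function.iterate_add_apply]
        congr 1; omega
      have h2 : ∀ v, (pvSh s)^[2] v = pvSh (s * 2) v := fun v => by
        show pvSh s (pvSh s v) = pvSh (s * 2) v
        rw [pvSh_double, Nat.mul_comm]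
      have hdouble : (pvSh s)^[2 * (m / 2)] = (pvSh (s * 2))^[m / 2] := by
        rw [Function.iterate_mul, funext h2]
      rw [hsplit, hdouble]
      congr 1
      rcases Nat.mod_two_eq_zero_or_one m with h | h <;> simp [h, pvShiftB_eq]

theorem pvSh_drop (s k : Nat) (w : List Int) : (pvSh s w).drop k = pvSh s (w.drop k) := by
  apply List.ext_getElem
  · simp [pvSh_length]; omega
  · intro i h1 h2
    rw [List.getElem_drop, pvSh_getElem, pvSh_getElem]
    simp only [List.getElem_drop]
    congr 2 <;> omega

theorem pvSh_take (s n : Nat) (w : List Int) : pvSh s (w.take n) = (pvSh s w).take (n - s) := by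
  apply List.ext_getElem
  · simp [pvSh_length]; omega
  · intro i h1 h2
    rw [List.getElem_take, pvSh_getElem, pvSh_getElem]
    simp only [List.getElem_take]

theorem pvIter_drop (m k : Nat) (w : List Int) :
    ((pvSh 1)^[m] w).drop k = (pvSh 1)^[m] (w.drop k) := by
  induction m generalizing w with
  | zero => simp
  | succ m ih =>
    rw [Function.iterate_succ_apply', Function.iterate_succ_apply', pvSh_drop, ih]

theorem pvIter_take (m n : Nat) (w : List Int) :
    (pvSh 1)^[m] (w.take n) = ((pvSh 1)^[m] w).take (n - m) := by
  induction m generalizing n w with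
  | zero => simp
  | succ m ih =>
    rw [Function.iterate_succ_apply', Function.iterate_succ_apply', ih, pvSh_take, Nat.sub_sub]

theorem pvIter_length (m : Nat) (w : List Int) :
    ((pvSh 1)^[m] w).length = w.length - m := by
  induction m generalizing w with
  | zero => simp
  | succ m ih => rw [Function.iterate_succ_apply', pvSh_length, ih]; omega

theorem pvFoldl_const_iter {α β : Type} (l : List β) (g : α → α) (x : α) :
    l.foldl (fun a _ => g a) x = g^[l.length] x := by
  induction l generalizing x with
  | nil => rfl
  | cons b t ih => simp [List.foldl_cons, ih, Function.iterate_succ_apply]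

-- ===== VERDICT (by name: the statement is the Claim_ definition above) =====
theorem kthXOR_spec : Claim_equal_kthXOR := by
  intro M N K arr _ hPre
  unfold Spec_kthXOR kthXOR kthXOR_alt
  by_cases h1 : N < 0 ∨ M > N
  · simp [h1]
  by_cases h2 : K ≥ N - M ∨ K < 0
  · have h2' : N ≤ K + M ∨ K < 0 := by omega
    simp [h1, h2']
  simp only [h1, h2, if_false]
  have hK0 : 0 ≤ K := by omega
  have hlen : K + max M 0 < (arr.length : Int) := by
    rcases hPre with h | h
    · exact absurd h (by tauto)
    · exact h
  set m : Nat := (if M > 0 then M else 0).toNat with hm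
  have hmax : (max M 0).toNat = m := by rw [hm]; omega
  have hmlen : K.toNat + m < arr.length := by omega
  -- A side
  have hfun : pvPassA = pvSh 1 := funext pvPassA_eq
  have hA : (PySem.List.pyRange 0 M 1).foldl (fun a _ => pvPassA a) arr
      = (pvSh 1)^[m] arr := by
    rw [pvFoldl_const_iter, PySem.List.length_pyRange_one, hfun]
    congr 1; omega
  rw [hA]
  -- B side
  have hslice : PySem.List.slice arr (some K) (some (K + (m : Int) + 1))
      = (arr.drop K.toNat).take (m + 1) := by
    rw [PySem.List.slice_toNat _ hK0 (by omega)]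
    congr 1; omega
  rw [hslice, pvLoopB_eq, pvIter_take, show m + 1 - m = 1 from by omega, ← pvIter_drop]
  -- both sides are element K.toNat of (pvSh 1)^[m] arr
  set X := (pvSh 1)^[m] arr with hX
  have hXlen : X.length = arr.length - m := pvIter_length m arr
  have hKX : K.toNat < X.length := by omega
  have hAg : PySem.List.pyGetD X K 0 = X[K.toNat]'hKX :=
    PySem.List.pyGetD_eq_getElem X (i := K) 0 hK0 (by omega)
  rw [hAg]
  have hne : 0 < ((X.drop K.toNat).take 1).length := by
    simp [List.length_take, List.length_drop]; omega
  rw [PySem.List.pyGetD_eq_getElem _ (i := 0) 0 (le_refl 0) (by exact_mod_cast hne)]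
  simp [List.getElem_take, List.getElem_drop]
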